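-- pv_equiv track=rewrite | github.com/Almond0629/DLCV_Final_Competition | column.py | combine_detection_classification_results
-- ===== SOURCE A (Python) =====
-- crack_criteria = {
--     'Diagonal': 4,
--     'Horizontal': 8,
--     'Vertical': 6,
--     'Web_and_X': 3
-- }
--
-- criteria_map = {
--     18: [0, 3, 4, 6, 8],
--     19: [5, 7],
--     20: [1, 9, 10]
-- }
--
-- def combine_detection_classification_results(detections, crack_class_pairs):
--     criteria_set = set()
--     if 'Exposed rebar' in detections:
--         criteria_set.add(0)
--     if len(detections) == 0:
--         criteria_set.add(1)
--
--     for crack_type in crack_class_pairs: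
--         key = crack_type
--         if key in crack_criteria:
--             criteria_set.add(crack_criteria[key])
--
--     if any(c in criteria_set for c in criteria_map[18]):
--         damage_class = 18
--     elif any(c in criteria_set for c in criteria_map[19]):
--         damage_class = 19
--     else:
--         damage_class = 20
--
--     valid_criteria = [c for c in criteria_set if c in criteria_map[damage_class]]
--
--     return damage_class, sorted(valid_criteria)
-- ===== SOURCE B (Python) =====
-- crack_criteria = {
--     'Diagonal': 4,
--     'Horizontal': 8,
--     'Vertical': 6,
--     'Web_and_X': 3
-- }
--
-- criteria_map = {
--     18: [0, 3, 4, 6, 8],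
--     19: [5, 7],
--     20: [1, 9, 10]
-- }
--
-- def combine_detection_classification_results(detections, crack_class_pairs):
--     # Every reachable criterion (rebar's 0 and all crack codes) lies in
--     # criteria_map[18]; only the empty-detections code 1 lies in criteria_map[20],
--     # and criteria_map[19] is unreachable.  So no priority cascade is needed.
--     vals = {crack_criteria[t] for t in crack_class_pairs if t in crack_criteria}
--     if 'Exposed rebar' in detections:
--         vals.add(0)
--     if vals:
--         return 18, sorted(vals)
--     return 20, [1] if len(detections) == 0 else []
-- ===== Notes on version B (the rewrite author's own statement) =====
-- stated objective: simpler
-- what changed: B drops the three sequential any() priority checks and the post-hoc filter: since every reachable criterion (0 and all crack codes) lies in criteria_map[18] and only the empty-detections code 1 lies in criteria_map[20] (class 19 is unreachable), B builds the crack-code set once and returns (18, sorted(set)) if it is nonempty, else (20, [1] or []).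
import Mathlib
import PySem

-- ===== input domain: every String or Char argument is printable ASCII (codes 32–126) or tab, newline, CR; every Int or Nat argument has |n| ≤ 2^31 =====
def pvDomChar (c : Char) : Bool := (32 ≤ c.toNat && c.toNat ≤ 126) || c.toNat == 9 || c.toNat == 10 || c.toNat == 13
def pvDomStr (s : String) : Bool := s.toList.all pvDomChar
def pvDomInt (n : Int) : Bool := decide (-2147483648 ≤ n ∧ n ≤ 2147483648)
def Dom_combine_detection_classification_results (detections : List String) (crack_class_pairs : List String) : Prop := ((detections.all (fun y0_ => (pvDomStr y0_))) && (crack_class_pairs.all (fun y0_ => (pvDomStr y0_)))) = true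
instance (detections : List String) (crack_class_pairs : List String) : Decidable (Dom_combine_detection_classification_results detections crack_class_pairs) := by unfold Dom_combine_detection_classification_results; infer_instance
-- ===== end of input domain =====

-- B replaces A's three sequential any() priority checks by the observation that every
-- reachable criterion except 1 lies in criteria_map[18] (simpler; return value equivalence).

-- ===== PORT A =====
def crack_criteria : PySem.Dict String Int :=
  PySem.Dict.mk [("Diagonal", 4), ("Horizontal", 8), ("Vertical", 6), ("Web_and_X", 3)]

def criteria_map : PySem.Dict Int (List Int) :=
  PySem.Dict.mk [(18, [0, 3, 4, 6, 8]), (19, [5, 7]), (20, [1, 9, 10])]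

-- 'if key in crack_criteria: criteria_set.add(crack_criteria[key])'
def addCrack (acc : PySem.Set Int) (key : String) : PySem.Set Int :=
  match PySem.Dict.get? crack_criteria key with
  | some v => PySem.Set.add acc v
  | none => acc

def combine_detection_classification_results (detections : List String) (crack_class_pairs : List String) : Int × List Int :=
  let s0 : PySem.Set Int := PySem.Set.empty
  let s1 : PySem.Set Int := if detections.contains "Exposed rebar" then PySem.Set.add s0 0 else s0
  let s2 : PySem.Set Int := if detections.length = 0 then PySem.Set.add s1 1 else s1
  let criteria_set : PySem.Set Int := crack_class_pairs.foldl addCrack s2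
  let damage_class : Int :=
    if (PySem.Dict.getD criteria_map 18 []).any (fun c => PySem.Set.contains criteria_set c) then 18
    else if (PySem.Dict.getD criteria_map 19 []).any (fun c => PySem.Set.contains criteria_set c) then 19
    else 20
  let valid_criteria : List Int := criteria_set.filter (fun c => (PySem.Dict.getD criteria_map damage_class []).contains c)
  (damage_class, PySem.List.sorted valid_criteria (fun x => x) false)

-- ===== PORT B =====
def combine_detection_classification_results_alt (detections : List String) (crack_class_pairs : List String) : Int × List Int :=
  let vals0 : PySem.Set Int := PySem.Set.ofList (crack_class_pairs.filterMap (fun t => PySem.Dict.get? crack_criteria t))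
  let vals : PySem.Set Int := if detections.contains "Exposed rebar" then PySem.Set.add vals0 0 else vals0
  if vals ≠ [] then (18, PySem.List.sorted vals (fun x => x) false)
  else (20, if detections.length = 0 then ([1] : List Int) else [])

-- ===== PRECONDITION & SPEC =====
def Spec_combine_detection_classification_results (detections : List String) (crack_class_pairs : List String) (out : Int × List Int) : Prop := out = combine_detection_classification_results_alt detections crack_class_pairs
instance (detections : List String) (crack_class_pairs : List String) (out : Int × List Int) : Decidable (Spec_combine_detection_classification_results detections crack_class_pairs out) := by unfold Spec_combine_detection_classification_results; infer_instance

-- ===== CLAIM (what is proved, stated in full; the proofs are below) =====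
def Claim_equal_combine_detection_classification_results : Prop := ∀ (detections : List String) (crack_class_pairs : List String), Dom_combine_detection_classification_results detections crack_class_pairs → Spec_combine_detection_classification_results detections crack_class_pairs (combine_detection_classification_results detections crack_class_pairs)

-- ===== LEMMAS AND PROOFS =====

-- every value crack_criteria can return is one of 4, 8, 6, 3
lemma cc_val_mem (t : String) (v : Int) (h : PySem.Dict.get? crack_criteria t = some v) :
    v = 4 ∨ v = 8 ∨ v = 6 ∨ v = 3 := by
  simp [crack_criteria, PySem.Dict.get?] at h
  obtain ⟨a, h⟩ := h
  tauto

lemma mem_addCrack_fold (pairs : List String) (init : PySem.Set Int) (x : Int) :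
    x ∈ pairs.foldl addCrack init ↔
      x ∈ init ∨ x ∈ pairs.filterMap (fun t => PySem.Dict.get? crack_criteria t) := by
  induction pairs generalizing init with
  | nil => simp
  | cons t ts ih =>
    simp only [List.foldl_cons, List.filterMap_cons]
    cases h : PySem.Dict.get? crack_criteria t with
    | none => simp [addCrack, h, ih]
    | some v =>
      simp [addCrack, h, ih, PySem.Set.mem_add]
      tauto

lemma nodup_addCrack_fold (pairs : List String) (init : PySem.Set Int) (h : init.Nodup) :
    (pairs.foldl addCrack init).Nodup := by
  induction pairs generalizing init with
  | nil => exact h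
  | cons t ts ih =>
    simp only [List.foldl_cons]
    apply ih
    unfold addCrack
    cases PySem.Dict.get? crack_criteria t with
    | none => exact h
    | some v => exact PySem.Set.nodup_add init v h

lemma addCrack_fold_of_none (pairs : List String) (init : PySem.Set Int)
    (h : ∀ t ∈ pairs, PySem.Dict.get? crack_criteria t = none) :
    pairs.foldl addCrack init = init := by
  induction pairs generalizing init with
  | nil => rfl
  | cons t ts ih =>
    simp only [List.foldl_cons, addCrack, h t (by simp)]
    exact ih init (fun u hu => h u (by simp [hu]))

-- sorted of A's filtered set equals sorted of B's set when memberships agree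
lemma result18 (s vals : List Int) (hs : s.Nodup) (hv : vals.Nodup)
    (hmem : ∀ x : Int, (x ∈ s ∧ x ∈ ([0, 3, 4, 6, 8] : List Int)) ↔ x ∈ vals) :
    PySem.List.sorted (s.filter (fun c => (([0, 3, 4, 6, 8] : List Int)).contains c)) (fun x => x) false
      = PySem.List.sorted vals (fun x => x) false := by
  apply PySem.List.sorted_eq_sorted_of_perm _ _ _ (fun a b h => h)
  rw [List.perm_ext_iff_of_nodup (hs.filter _) hv]
  intro x
  rw [← hmem x]
  simp [List.mem_filter]



lemma L_sub (pairs : List String) (x : Int)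
    (hx : x ∈ pairs.filterMap (fun t => PySem.Dict.get? crack_criteria t)) :
    x ∈ ([0, 3, 4, 6, 8] : List Int) := by
  rw [List.mem_filterMap] at hx
  obtain ⟨t, _, ht⟩ := hx
  rcases cc_val_mem t x ht with h | h | h | h <;> simp [h]

-- ===== VERDICT (by name: the statement is the Claim_ definition above) =====
theorem combine_detection_classification_results_spec : Claim_equal_combine_detection_classification_results := by
  intro dets pairs _
  unfold Spec_combine_detection_classification_results
  unfold combine_detection_classification_results combine_detection_classification_results_alt
  simp only []
  set L := pairs.filterMap (fun t => PySem.Dict.get? crack_criteria t) with hLdef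
  have h18 : criteria_map.getD 18 [] = ([0, 3, 4, 6, 8] : List Int) := by decide
  have h19 : criteria_map.getD 19 [] = ([5, 7] : List Int) := by decide
  have h20 : criteria_map.getD 20 [] = ([1, 9, 10] : List Int) := by decide
  by_cases hr : dets.contains "Exposed rebar" = true
  · -- 'Exposed rebar' detected: criteria 0 present, class 18 on both sides
    have hne : dets.length ≠ 0 := by
      intro h0
      rw [List.length_eq_zero_iff] at h0
      subst h0; simp at hr
    simp only [hr, hne, if_true, if_false]
    set s := List.foldl addCrack (PySem.Set.empty.add 0) pairs with hsdef
    have hmem : ∀ x : Int, x ∈ s ↔ x = 0 ∨ x ∈ L := by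
      intro x
      rw [hsdef, mem_addCrack_fold]
      simp [PySem.Set.empty, or_comm, hLdef, List.mem_filterMap]
    have h0s : (0 : Int) ∈ s := (hmem 0).2 (Or.inl rfl)
    have hany : ((criteria_map.getD 18 []).any fun c => s.contains c) = true := by
      rw [List.any_eq_true]
      exact ⟨0, by rw [h18]; decide, (PySem.Set.contains_iff s 0).2 h0s⟩
    have hBne : (PySem.Set.ofList L).add 0 ≠ [] := by
      intro h
      have h0 : (0 : Int) ∈ (PySem.Set.ofList L).add 0 := (PySem.Set.mem_add _ _ _).2 (Or.inr rfl)
      rw [h] at h0; simp at h0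
    rw [if_pos hBne]
    simp only [hany, if_true]
    simp only [Prod.mk.injEq, true_and]
    rw [h18]
    apply result18
    · exact nodup_addCrack_fold pairs _ (by decide)
    · exact PySem.Set.nodup_add _ _ (PySem.Set.nodup_ofList L)
    · intro x
      rw [PySem.Set.mem_add, PySem.Set.mem_ofList, hmem]
      constructor
      · rintro ⟨h1 | h1, _⟩
        · exact Or.inr h1
        · exact Or.inl h1
      · rintro (h1 | h1)
        · exact ⟨Or.inr h1, L_sub pairs x h1⟩
        · exact ⟨Or.inl h1, by rw [h1]; decide⟩
  · -- no 'Exposed rebar'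
    rw [Bool.not_eq_true] at hr
    simp only [hr, if_false, Bool.false_eq_true]
    by_cases he : dets.length = 0
    · -- empty detections: criterion 1 present
      simp only [he, if_true]
      by_cases hL : L = []
      · -- no recognised cracks: class 20, criteria [1]
        have hnone : ∀ t ∈ pairs, PySem.Dict.get? crack_criteria t = none := by
          rw [hLdef] at hL
          simpa [List.filterMap_eq_nil_iff] using hL
        rw [addCrack_fold_of_none pairs _ hnone]
        rw [hL]
        norm_num [h18, h19, h20, PySem.Set.empty, PySem.Set.add, PySem.Set.ofList]
        decide
      · -- some recognised crack: class 18 on both sides, the 1 is filtered away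
        set s := List.foldl addCrack (PySem.Set.empty.add 1) pairs with hsdef
        have hmem : ∀ x : Int, x ∈ s ↔ x = 1 ∨ x ∈ L := by
          intro x
          rw [hsdef, mem_addCrack_fold]
          simp [PySem.Set.empty, or_comm, hLdef, List.mem_filterMap]
        obtain ⟨y, hy⟩ := List.exists_mem_of_ne_nil L hL
        have hyb : y ∈ ([0, 3, 4, 6, 8] : List Int) := L_sub pairs y hy
        have hany : ((criteria_map.getD 18 []).any fun c => s.contains c) = true := by
          rw [List.any_eq_true]
          exact ⟨y, by rw [h18]; exact hyb, (PySem.Set.contains_iff s y).2 ((hmem y).2 (Or.inr hy))⟩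
        have hBne : (PySem.Set.ofList L : List Int) ≠ [] := by
          intro h
          have h0 : y ∈ PySem.Set.ofList L := (PySem.Set.mem_ofList L y).2 hy
          rw [h] at h0; simp at h0
        rw [if_pos hBne]
        simp only [hany, if_true]
        simp only [Prod.mk.injEq, true_and]
        rw [h18]
        apply result18
        · exact nodup_addCrack_fold pairs _ (by decide)
        · exact PySem.Set.nodup_ofList L
        · intro x
          rw [PySem.Set.mem_ofList, hmem]
          constructor
          · rintro ⟨h1 | h1, hb⟩
            · rw [h1] at hb; simp at hb
            · exact h1
          · intro h1
            exact ⟨Or.inr h1, L_sub pairs x h1⟩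
    · -- nonempty detections, no rebar
      simp only [he, if_false]
      by_cases hL : L = []
      · have hnone : ∀ t ∈ pairs, PySem.Dict.get? crack_criteria t = none := by
          rw [hLdef] at hL
          simpa [List.filterMap_eq_nil_iff] using hL
        rw [addCrack_fold_of_none pairs _ hnone]
        rw [hL]
        norm_num [h18, h19, h20, PySem.Set.empty, PySem.Set.ofList]
        decide
      · set s := List.foldl addCrack PySem.Set.empty pairs with hsdef
        have hmem : ∀ x : Int, x ∈ s ↔ x ∈ L := by
          intro x
          rw [hsdef, mem_addCrack_fold]
          simp [PySem.Set.empty, hLdef, List.mem_filterMap]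
        obtain ⟨y, hy⟩ := List.exists_mem_of_ne_nil L hL
        have hyb : y ∈ ([0, 3, 4, 6, 8] : List Int) := L_sub pairs y hy
        have hany : ((criteria_map.getD 18 []).any fun c => s.contains c) = true := by
          rw [List.any_eq_true]
          exact ⟨y, by rw [h18]; exact hyb, (PySem.Set.contains_iff s y).2 ((hmem y).2 hy)⟩
        have hBne : (PySem.Set.ofList L : List Int) ≠ [] := by
          intro h
          have h0 : y ∈ PySem.Set.ofList L := (PySem.Set.mem_ofList L y).2 hy
          rw [h] at h0; simp at h0
        rw [if_pos hBne]
        simp only [hany, if_true]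
        simp only [Prod.mk.injEq, true_and]
        rw [h18]
        apply result18
        · exact nodup_addCrack_fold pairs _ (by decide)
        · exact PySem.Set.nodup_ofList L
        · intro x
          rw [PySem.Set.mem_ofList, hmem]
          exact ⟨fun h => h.1, fun h => ⟨h, L_sub pairs x h⟩⟩
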